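-- pv_equiv track=rewrite | github.com/tomorrowdevs-projects/challenges | challenges/intermediate/prime-reversion/solutions/aleattene/solution.py | product_and_sum_digit_number
-- ===== SOURCE A (Python) =====
-- def product_and_sum_digit_number(pair):
--     # Product between the two numbers that make up the pair
--     product = pair[0] * pair[1]
--     sum_product = 0
--     # Sum of the digits that make up product, starting from the least significant to the most significant
--     while True:
--         # There are no other digits to sum (end of cycle)
--         if not product:
--             break
--         # Increment of the sum_product with the value of the last digit of the number
--         sum_product += product % 10
--         # Removing last digit from the number
--         product //= 10
--     # Return the sum of the digits that compose product
--     return sum_product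
-- ===== SOURCE B (Python) =====
-- def product_and_sum_digit_number(pair):
--     product = pair[0] * pair[1]
--     return sum(int(ch) for ch in str(product))
-- ===== Notes on version B (the rewrite author's own statement) =====
-- stated objective: idiomatic
-- what changed: B stringifies the product and sums its digit characters with sum(int(ch) for ch in str(product)) instead of A's while loop peeling digits with %10 and //=10.
import Mathlib
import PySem

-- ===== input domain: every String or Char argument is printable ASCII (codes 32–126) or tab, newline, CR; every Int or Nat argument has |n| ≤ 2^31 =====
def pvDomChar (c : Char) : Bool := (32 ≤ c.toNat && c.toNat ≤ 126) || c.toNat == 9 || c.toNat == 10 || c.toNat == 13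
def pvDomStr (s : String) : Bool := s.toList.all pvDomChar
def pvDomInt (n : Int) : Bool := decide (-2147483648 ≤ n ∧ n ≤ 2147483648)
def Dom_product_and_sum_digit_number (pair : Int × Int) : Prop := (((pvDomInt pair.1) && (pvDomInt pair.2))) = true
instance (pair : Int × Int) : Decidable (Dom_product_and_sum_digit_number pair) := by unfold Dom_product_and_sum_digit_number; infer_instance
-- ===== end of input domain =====

-- B stringifies the product and sums its digit characters instead of A's %10 / //=10 peeling loop (idiomatic, same cost).


-- ===== PORT A =====
-- A's while loop: sum_product += product % 10; product //= 10; stop when product == 0.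
-- For a negative product the Python loop never terminates (product //= 10 stabilises at -1), so those
-- inputs are excluded by Pre_; on the admitted nonnegative products '% 10' and '// 10' coincide with
-- Nat '%'/'/' on product.toNat, on which the loop is transcribed (structural recursion needs a
-- terminating measure).
def pvLoopA (product : Nat) (sum_product : Int) : Int :=
  if product = 0 then sum_product
  else pvLoopA (product / 10) (sum_product + (product % 10 : Nat))
  termination_by product
  decreasing_by exact Nat.div_lt_self (Nat.pos_of_ne_zero (by assumption)) (by omega)

def product_and_sum_digit_number (pair : Int × Int) : Int :=
  pvLoopA (pair.1 * pair.2).toNat 0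

-- ===== PORT B =====
-- str(product) → PySem.Int.toChars; int(ch) on a digit character is its code minus 48 (exact there).
def product_and_sum_digit_number_alt (pair : Int × Int) : Int :=
  let product := pair.1 * pair.2
  ((PySem.Int.toChars product).map (fun c => (c.toNat : Int) - 48)).sum

-- ===== PRECONDITION & SPEC =====
-- Pre_ excludes negative products: there A's while loop never terminates (product //= 10 stabilises at -1),
-- so A returns no value on those inputs.
def Pre_product_and_sum_digit_number (pair : Int × Int) : Prop := 0 ≤ pair.1 * pair.2
instance (pair : Int × Int) : Decidable (Pre_product_and_sum_digit_number pair) := by unfold Pre_product_and_sum_digit_number; infer_instance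
def pvWitness_product_and_sum_digit_number : (Int × Int) := (12, 34)

def Spec_product_and_sum_digit_number (pair : Int × Int) (out : Int) : Prop := out = product_and_sum_digit_number_alt pair
instance (pair : Int × Int) (out : Int) : Decidable (Spec_product_and_sum_digit_number pair out) := by unfold Spec_product_and_sum_digit_number; infer_instance

-- ===== CLAIM (what is proved, stated in full; the proofs are below) =====
def Claim_equal_product_and_sum_digit_number : Prop := ∀ (pair : Int × Int), Dom_product_and_sum_digit_number pair → Pre_product_and_sum_digit_number pair → Spec_product_and_sum_digit_number pair (product_and_sum_digit_number pair)

-- ===== LEMMAS AND PROOFS =====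

-- the common yardstick: the decimal digit sum of a natural number
def pvDSum (n : Nat) : Int := (List.map (fun d : Nat => (d : Int)) (Nat.digits 10 n)).sum

theorem pvDSum_step (n : Nat) (h : 0 < n) :
    pvDSum n = ((n % 10 : Nat) : Int) + pvDSum (n / 10) := by
  unfold pvDSum
  rw [Nat.digits_def' (by omega : 1 < 10) h, List.map_cons, List.sum_cons]

theorem pvLoopA_eq_dsum : ∀ (n : Nat) (acc : Int), pvLoopA n acc = acc + pvDSum n := by
  intro n
  induction n using Nat.strong_induction_on with
  | _ n ih =>
    intro acc
    rw [pvLoopA]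
    by_cases h : n = 0
    · simp [h, pvDSum]
    · rw [if_neg h, ih (n / 10) (Nat.div_lt_self (Nat.pos_of_ne_zero h) (by omega)),
        pvDSum_step n (Nat.pos_of_ne_zero h)]
      ring

theorem pvDigitChar_val (d : Nat) (hd : d < 10) :
    ((Nat.digitChar d).toNat : Int) - 48 = (d : Int) := by
  interval_cases d <;> decide

-- character digit sum of Nat.toDigitsCore, given enough fuel
theorem pvToDigitsCore_sum : ∀ (f n : Nat) (acc : List Char), n < 10 ^ f →
    ((Nat.toDigitsCore 10 f n acc).map (fun c => (c.toNat : Int) - 48)).sum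
      = pvDSum n + (acc.map (fun c => (c.toNat : Int) - 48)).sum := by
  intro f
  induction f with
  | zero =>
    intro n acc h
    have : n = 0 := by omega
    simp [Nat.toDigitsCore, this, pvDSum]
  | succ f ih =>
    intro n acc h
    rw [Nat.toDigitsCore]
    by_cases h0 : n / 10 = 0
    · rw [if_pos h0, List.map_cons, List.sum_cons, pvDigitChar_val (n % 10) (Nat.mod_lt n (by omega))]
      by_cases hz : n = 0
      · simp [hz, pvDSum]
      · rw [pvDSum_step n (Nat.pos_of_ne_zero hz), h0]
        have h00 : pvDSum 0 = 0 := by simp [pvDSum]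
        rw [h00]; ring
    · rw [if_neg h0]
      have hlt : n / 10 < 10 ^ f := by
        apply Nat.div_lt_of_lt_mul
        calc n < 10 ^ (f + 1) := h
          _ = 10 * 10 ^ f := by ring
      rw [ih (n / 10) _ hlt, List.map_cons, List.sum_cons,
        pvDigitChar_val (n % 10) (Nat.mod_lt n (by omega))]
      have hz : 0 < n := by
        rcases Nat.eq_zero_or_pos n with h' | h'
        · exact absurd (by simp [h']) h0
        · exact h'
      rw [pvDSum_step n hz]
      ring

theorem pvToDigits_sum (n : Nat) :
    ((Nat.toDigits 10 n).map (fun c => (c.toNat : Int) - 48)).sum = pvDSum n := by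
  have h : n < 10 ^ (n + 1) := by
    calc n < 2 ^ (n + 1) := Nat.lt_two_pow_self.trans_le (Nat.pow_le_pow_right (by omega) (by omega))
      _ ≤ 10 ^ (n + 1) := Nat.pow_le_pow_left (by omega) _
  simpa using pvToDigitsCore_sum (n + 1) n [] h

-- ===== VERDICT (by name: the statement is the Claim_ definition above) =====
theorem product_and_sum_digit_number_spec : Claim_equal_product_and_sum_digit_number := by
  intro pair _ hpre
  unfold Spec_product_and_sum_digit_number product_and_sum_digit_number product_and_sum_digit_number_alt
  have hneg : ¬ pair.1 * pair.2 < 0 := not_lt.mpr hpre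
  simp only [PySem.Int.toChars, if_neg hneg]
  rw [pvLoopA_eq_dsum, pvToDigits_sum]
  ring
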